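-- pv_equiv track=rewrite | github.com/sologenai/sga-ragflow-GM | api/utils/password_validation.py | _has_consecutive_sequence
-- ===== SOURCE A (Python) =====
-- def _has_consecutive_sequence(value: str, min_len: int) -> bool:
--     if len(value) < min_len:
--         return False
--
--     lower = value.lower()
--     for i in range(len(lower) - min_len + 1):
--         window = lower[i : i + min_len]
--         if not (window.isdigit() or window.isalpha()):
--             continue
--
--         steps = [ord(window[j]) - ord(window[j - 1]) for j in range(1, len(window))]
--         if all(step == 1 for step in steps) or all(step == -1 for step in steps):
--             return True
--
--     return False
-- ===== SOURCE B (Python) =====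
-- def _has_consecutive_sequence(value: str, min_len: int) -> bool:
--     if min_len < 1:
--         return False
--     run_up = run_down = 0
--     prev = None
--     for c in value.lower():
--         if c.isdigit() or c.isalpha():
--             o = ord(c)
--             run_up = run_up + 1 if prev == o - 1 else 1
--             run_down = run_down + 1 if prev == o + 1 else 1
--             if run_up >= min_len or run_down >= min_len:
--                 return True
--             prev = o
--         else:
--             run_up = run_down = 0
--             prev = None
--     return False
-- ===== Notes on version B (the rewrite author's own statement) =====
-- stated objective: faster
-- what changed: Replaced A's O(n*min_len) sliding-window scan (re-slicing and re-checking a length-min_len window at every position) by a single O(n) left-to-right pass that maintains the lengths of the current ascending and descending alphanumeric runs, resetting on non-alphanumeric characters.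
-- outside the precondition, e.g. on _has_consecutive_sequence('abcdefgh', -5): A returns True, B returns False; on _has_consecutive_sequence('ab', -1): A returns True, B returns False
import Mathlib
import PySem

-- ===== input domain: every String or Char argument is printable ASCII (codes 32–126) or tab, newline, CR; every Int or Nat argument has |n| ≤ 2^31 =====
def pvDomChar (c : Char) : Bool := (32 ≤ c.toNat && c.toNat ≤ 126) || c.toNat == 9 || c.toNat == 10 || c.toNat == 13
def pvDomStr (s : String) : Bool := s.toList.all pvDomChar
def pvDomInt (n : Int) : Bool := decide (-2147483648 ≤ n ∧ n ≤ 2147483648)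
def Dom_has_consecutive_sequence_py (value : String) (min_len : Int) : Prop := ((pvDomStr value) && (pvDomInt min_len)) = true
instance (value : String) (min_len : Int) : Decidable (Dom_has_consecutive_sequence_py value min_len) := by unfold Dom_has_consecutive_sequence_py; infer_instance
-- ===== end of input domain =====

-- B replaces A's sliding-window re-scan by a single pass that tracks the current ascending and
-- descending alphanumeric run lengths (objective: faster).

-- ===== PORT A =====
-- ord(c)
def pvOrd (c : Char) : Int := (c.toNat : Int)

-- steps = [ord(window[j]) - ord(window[j - 1]) for j in range(1, len(window))]
def pvStepsA (w : List Char) : List Int :=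
  (PySem.List.pyRange 1 (w.length : Int) 1).map
    (fun j => pvOrd (PySem.List.pyGetD w j ' ') - pvOrd (PySem.List.pyGetD w (j - 1) ' '))

-- the body of A's window loop at index i ('continue' ↦ false)
def pvWindowA (lower : String) (min_len : Int) (i : Int) : Bool :=
  let window := PySem.Str.slice lower (some i) (some (i + min_len))
  if !(PySem.Str.strIsdigit window || PySem.Str.strIsalpha window) then false
  else
    let steps := pvStepsA window.toList
    steps.all (fun s => s == 1) || steps.all (fun s => s == -1)

def has_consecutive_sequence_py (value : String) (min_len : Int) : Bool :=
  if (value.length : Int) < min_len then false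
  else
    let lower := PySem.Str.lower value
    (PySem.List.pyRange 0 ((lower.length : Int) - min_len + 1) 1).any
      (fun i => pvWindowA lower min_len i)

-- ===== PORT B =====
-- the single pass: run_up/run_down are the current ascending/descending run lengths
def pvLoopB (m : Int) (prev : Option Int) (run_up run_down : Int) : List Char → Bool
  | [] => false
  | c :: rest =>
    if PySem.Chars.isdigit c || PySem.Chars.isalpha c then
      let o := pvOrd c
      let up' := if prev = some (o - 1) then run_up + 1 else 1
      let down' := if prev = some (o + 1) then run_down + 1 else 1
      if m ≤ up' ∨ m ≤ down' then true
      else pvLoopB m (some o) up' down' rest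
    else pvLoopB m none 0 0 rest

def has_consecutive_sequence_py_alt (value : String) (min_len : Int) : Bool :=
  if min_len < 1 then false
  else pvLoopB min_len none 0 0 (PySem.Str.lower value).toList

-- ===== PRECONDITION & SPEC =====
-- Pre_ excludes only negative min_len: there A's window lower[i : i+min_len] silently becomes a
-- negative-end Python slice (wraparound), so A's True/False answer on that nonsensical request is
-- an accident of Python slicing; B simply returns False for any min_len < 1.
def Pre_has_consecutive_sequence_py (value : String) (min_len : Int) : Prop := 0 ≤ min_len
instance (value : String) (min_len : Int) : Decidable (Pre_has_consecutive_sequence_py value min_len) := by unfold Pre_has_consecutive_sequence_py; infer_instance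

def pvWitness_has_consecutive_sequence_py : String × Int := ("abc1", 3)

def Spec_has_consecutive_sequence_py (value : String) (min_len : Int) (out : Bool) : Prop := out = has_consecutive_sequence_py_alt value min_len
instance (value : String) (min_len : Int) (out : Bool) : Decidable (Spec_has_consecutive_sequence_py value min_len out) := by unfold Spec_has_consecutive_sequence_py; infer_instance

-- ===== CLAIM (what is proved, stated in full; the proofs are below) =====
def Claim_equal_has_consecutive_sequence_py : Prop := ∀ (value : String) (min_len : Int), Dom_has_consecutive_sequence_py value min_len → Pre_has_consecutive_sequence_py value min_len → Spec_has_consecutive_sequence_py value min_len (has_consecutive_sequence_py value min_len)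

-- ===== LEMMAS AND PROOFS =====
def pvAn (c : Char) : Bool := PySem.Chars.isdigit c || PySem.Chars.isalpha c
def pvContU : Option Int → List Char → Int
  | _, [] => 0
  | prev, c :: r => if pvAn c = true ∧ prev = some (pvOrd c - 1) then 1 + pvContU (some (pvOrd c)) r else 0
theorem pvIsdigit_iff (c : Char) : PySem.Chars.isdigit c = true ↔ 48 ≤ c.toNat ∧ c.toNat ≤ 57 := by
  simp only [PySem.Chars.isdigit, Char.le_def, UInt32.le_iff_toNat_le, Char.toNat_val, Bool.and_eq_true, decide_eq_true_eq]
  exact Iff.rfl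
theorem pvIsalpha_iff (c : Char) : PySem.Chars.isalpha c = true ↔ (65 ≤ c.toNat ∧ c.toNat ≤ 90) ∨ (97 ≤ c.toNat ∧ c.toNat ≤ 122) := by
  simp only [PySem.Chars.isalpha, PySem.Chars.isupper, PySem.Chars.islower, Char.le_def, UInt32.le_iff_toNat_le, Char.toNat_val, Bool.or_eq_true, Bool.and_eq_true, decide_eq_true_eq]
  exact Iff.rfl
theorem pvSameClass (c d : Char) (hc : pvAn c = true) (hd : pvAn d = true)
    (h : pvOrd d = pvOrd c + 1 ∨ pvOrd d = pvOrd c - 1) :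
    PySem.Chars.isdigit d = PySem.Chars.isdigit c ∧ PySem.Chars.isalpha d = PySem.Chars.isalpha c := by
  simp only [pvAn, Bool.or_eq_true] at hc hd
  simp only [pvOrd] at h
  constructor <;> rw [Bool.eq_iff_iff] <;>
    rcases hc with hc | hc <;> rcases hd with hd | hd <;>
    simp only [pvIsdigit_iff, pvIsalpha_iff] at * <;> omega
theorem pvContU_nonneg (l : List Char) : ∀ p, 0 ≤ pvContU p l := by
  induction l with
  | nil => intro p; simp [pvContU]
  | cons c r ih =>
    intro p
    simp only [pvContU]
    split
    · have := ih (some (pvOrd c)); omega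
    · omega
theorem pvContU_none (l : List Char) : pvContU none l = 0 := by
  cases l with
  | nil => rfl
  | cons c r => simp [pvContU]
theorem pvContU_le (l : List Char) : ∀ p, pvContU p l ≤ l.length := by
  induction l with
  | nil => intro p; simp [pvContU]
  | cons c r ih =>
    intro p
    simp only [pvContU, List.length_cons]
    split
    · have := ih (some (pvOrd c)); push_cast; omega
    · positivity
def pvHU : List Char → Int
  | [] => 0
  | c :: r => if pvAn c = true then 1 + pvContU (some (pvOrd c)) r else 0
theorem pvHU_le (l : List Char) : pvHU l ≤ l.length := by
  cases l with
  | nil => simp [pvHU]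
  | cons c r =>
    simp only [pvHU, List.length_cons]
    split
    · have := pvContU_le r (some (pvOrd c)); push_cast; omega
    · positivity
def pvChainFU : Int → List Char → Bool
  | _, [] => true
  | o, c :: r => pvAn c && (pvOrd c == o + 1) && pvChainFU (pvOrd c) r
def pvChainU : List Char → Bool
  | [] => false
  | c :: r => pvAn c && pvChainFU (pvOrd c) r
theorem pvContU_take (r : List Char) : ∀ (o : Int) (k : Nat), k ≤ r.length →
    ((k : Int) ≤ pvContU (some o) r ↔ pvChainFU o (r.take k) = true) := by
  induction r with
  | nil =>
    intro o k hk
    simp at hk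
    subst hk
    simp [pvContU, pvChainFU]
  | cons c r ih =>
    intro o k hk
    cases k with
    | zero =>
      have := pvContU_nonneg (c :: r) (some o)
      simp [pvChainFU]
      omega
    | succ k =>
      simp only [List.take_succ_cons, pvChainFU, pvContU, Bool.and_eq_true, beq_iff_eq]
      split
      · rename_i hcond
        obtain ⟨han, hprev⟩ := hcond
        have hoc : pvOrd c = o + 1 := by
          injection hprev with h'; omega
        have hrec := ih (pvOrd c) k (by simpa using hk)
        push_cast
        constructor
        · intro hle
          exact ⟨⟨han, hoc⟩, hrec.mp (by omega)⟩
        · rintro ⟨-, hch⟩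
          have := hrec.mpr hch
          omega
      · rename_i hcond
        constructor
        · intro hle; push_cast at hle; omega
        · rintro ⟨⟨han, hoc⟩, -⟩
          have hsome : some o = some (pvOrd c - 1) := by rw [hoc]; congr 1; ring
          exact absurd ⟨han, hsome⟩ hcond
theorem pvHU_take (t : List Char) (k : Nat) (hk : 1 ≤ k) (hkl : k ≤ t.length) :
    ((k : Int) ≤ pvHU t ↔ pvChainU (t.take k) = true) := by
  cases t with
  | nil => simp at hkl; omega
  | cons c r =>
    cases k with
    | zero => omega
    | succ k =>
      simp only [List.take_succ_cons, pvChainU, pvHU, Bool.and_eq_true]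
      by_cases han : pvAn c = true
      · rw [if_pos han]
        rw [← pvContU_take r (pvOrd c) k (by simpa using hkl)]
        push_cast
        constructor
        · intro h; exact ⟨han, by omega⟩
        · rintro ⟨-, h⟩; omega
      · rw [if_neg han]
        constructor
        · intro h; push_cast at h; omega
        · rintro ⟨h, -⟩; exact absurd h han
def pvStepsRec : List Char → List Int
  | [] => []
  | [_] => []
  | c :: d :: r => (pvOrd d - pvOrd c) :: pvStepsRec (d :: r)
theorem pvStepsAux : ∀ (w : List Char),
    (List.range (w.length - 1)).map (fun k => pvOrd (w.getD (k+1) ' ') - pvOrd (w.getD k ' ')) = pvStepsRec w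
  | [] => by simp [pvStepsRec]
  | [c] => by simp [pvStepsRec]
  | c :: d :: r => by
    have ih := pvStepsAux (d :: r)
    simp only [List.length_cons, Nat.add_sub_cancel] at ih ⊢
    rw [List.range_succ_eq_map]
    simp only [List.map_cons, List.map_map, pvStepsRec]
    congr 1

theorem pvStepsA_eq (w : List Char) : pvStepsA w = pvStepsRec w := by
  unfold pvStepsA
  rw [PySem.List.pyRange_one, List.map_map, ← pvStepsAux w]
  have hlen : ((w.length : Int) - 1).toNat = w.length - 1 := by omega
  rw [hlen]
  apply List.map_congr_left
  intro k hk
  simp only [Function.comp]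
  have h1 : (1 : Int) + (k : Int) = ((k + 1 : Nat) : Int) := by push_cast; ring
  have h2 : (1 : Int) + (k : Int) - 1 = ((k : Nat) : Int) := by ring
  rw [h1] at h2 ⊢
  rw [h2, PySem.List.pyGetD_natCast, PySem.List.pyGetD_natCast]
theorem pvAll1_iff : ∀ (r : List Char) (c : Char),
    (((pvStepsRec (c :: r)).all (fun s => s == 1) = true ∧ (c :: r).all pvAn = true) ↔
      (pvAn c = true ∧ pvChainFU (pvOrd c) r = true))
  | [], c => by simp [pvStepsRec, pvChainFU]
  | d :: r, c => by
    have ih := pvAll1_iff r d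
    simp only [pvStepsRec, pvChainFU, List.all_cons, Bool.and_eq_true, beq_iff_eq] at ih ⊢
    constructor
    · rintro ⟨⟨h1, hrest⟩, hc, hd, hr⟩
      have := ih.mp ⟨hrest, hd, hr⟩
      exact ⟨hc, ⟨hd, by omega⟩, this.2⟩
    · rintro ⟨hc, ⟨hd, ho⟩, hch⟩
      have := ih.mpr ⟨hd, hch⟩
      exact ⟨⟨by omega, this.1⟩, hc, this.2.1, this.2.2⟩
def pvContD : Option Int → List Char → Int
  | _, [] => 0
  | prev, c :: r => if pvAn c = true ∧ prev = some (pvOrd c + 1) then 1 + pvContD (some (pvOrd c)) r else 0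
def pvHD : List Char → Int
  | [] => 0
  | c :: r => if pvAn c = true then 1 + pvContD (some (pvOrd c)) r else 0
def pvChainFD : Int → List Char → Bool
  | _, [] => true
  | o, c :: r => pvAn c && (pvOrd c == o - 1) && pvChainFD (pvOrd c) r
def pvChainD : List Char → Bool
  | [] => false
  | c :: r => pvAn c && pvChainFD (pvOrd c) r
theorem pvAllm1_iff : ∀ (r : List Char) (c : Char),
    (((pvStepsRec (c :: r)).all (fun s => s == -1) = true ∧ (c :: r).all pvAn = true) ↔
      (pvAn c = true ∧ pvChainFD (pvOrd c) r = true))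
  | [], c => by simp [pvStepsRec, pvChainFD]
  | d :: r, c => by
    have ih := pvAllm1_iff r d
    simp only [pvStepsRec, pvChainFD, List.all_cons, Bool.and_eq_true, beq_iff_eq] at ih ⊢
    constructor
    · rintro ⟨⟨h1, hrest⟩, hc, hd, hr⟩
      have := ih.mp ⟨hrest, hd, hr⟩
      exact ⟨hc, ⟨hd, by omega⟩, this.2⟩
    · rintro ⟨hc, ⟨hd, ho⟩, hch⟩
      have := ih.mpr ⟨hd, hch⟩
      exact ⟨⟨by omega, this.1⟩, hc, this.2.1, this.2.2⟩
-- an ascending chain is class-pure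
theorem pvPureU : ∀ (r : List Char) (c : Char), pvAn c = true → pvChainFU (pvOrd c) r = true →
    (PySem.Chars.strIsdigit (c :: r) = true ∨ PySem.Chars.strIsalpha (c :: r) = true)
  | [], c => by
    intro han _
    simp only [pvAn, Bool.or_eq_true] at han
    rcases han with h | h
    · left; simp [PySem.Chars.strIsdigit, h]
    · right; simp [PySem.Chars.strIsalpha, h]
  | d :: r, c => by
    intro han hch
    simp only [pvChainFU, Bool.and_eq_true, beq_iff_eq] at hch
    obtain ⟨⟨hand, ho⟩, hch⟩ := hch
    have ih := pvPureU r d hand hch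
    have hcls := pvSameClass c d han hand (Or.inl ho)
    rcases ih with h | h
    · left
      simp only [PySem.Chars.strIsdigit, List.isEmpty_cons, List.all_cons, Bool.and_eq_true] at h ⊢
      refine ⟨by simp, ?_, h.2⟩
      rw [← hcls.1]; exact h.2.1
    · right
      simp only [PySem.Chars.strIsalpha, List.isEmpty_cons, List.all_cons, Bool.and_eq_true] at h ⊢
      refine ⟨by simp, ?_, h.2⟩
      rw [← hcls.2]; exact h.2.1
theorem pvPureD : ∀ (r : List Char) (c : Char), pvAn c = true → pvChainFD (pvOrd c) r = true →
    (PySem.Chars.strIsdigit (c :: r) = true ∨ PySem.Chars.strIsalpha (c :: r) = true)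
  | [], c => by
    intro han _
    simp only [pvAn, Bool.or_eq_true] at han
    rcases han with h | h
    · left; simp [PySem.Chars.strIsdigit, h]
    · right; simp [PySem.Chars.strIsalpha, h]
  | d :: r, c => by
    intro han hch
    simp only [pvChainFD, Bool.and_eq_true, beq_iff_eq] at hch
    obtain ⟨⟨hand, ho⟩, hch⟩ := hch
    have ih := pvPureD r d hand hch
    have hcls := pvSameClass c d han hand (Or.inr ho)
    rcases ih with h | h
    · left
      simp only [PySem.Chars.strIsdigit, List.isEmpty_cons, List.all_cons, Bool.and_eq_true] at h ⊢
      refine ⟨by simp, ?_, h.2⟩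
      rw [← hcls.1]; exact h.2.1
    · right
      simp only [PySem.Chars.strIsalpha, List.isEmpty_cons, List.all_cons, Bool.and_eq_true] at h ⊢
      refine ⟨by simp, ?_, h.2⟩
      rw [← hcls.2]; exact h.2.1
theorem pvPure_an (w : List Char)
    (h : PySem.Chars.strIsdigit w = true ∨ PySem.Chars.strIsalpha w = true) : w.all pvAn = true := by
  rcases h with h | h <;>
    simp only [PySem.Chars.strIsdigit, PySem.Chars.strIsalpha, Bool.and_eq_true, List.all_eq_true] at h ⊢ <;>
    intro x hx <;> simp only [pvAn, Bool.or_eq_true] <;> [left; right] <;> exact h.2 x hx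
theorem pvWindowCheck_iff (c : Char) (r : List Char) :
    (((PySem.Chars.strIsdigit (c :: r) || PySem.Chars.strIsalpha (c :: r)) &&
      ((pvStepsRec (c :: r)).all (fun s => s == 1) || (pvStepsRec (c :: r)).all (fun s => s == -1))) = true
     ↔ (pvChainU (c :: r) = true ∨ pvChainD (c :: r) = true)) := by
  simp only [Bool.and_eq_true, Bool.or_eq_true, pvChainU, pvChainD]
  constructor
  · rintro ⟨hpure, hsteps⟩
    have hall := pvPure_an _ hpure
    rcases hsteps with h1 | hm1
    · exact Or.inl ((pvAll1_iff r c).mp ⟨h1, hall⟩)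
    · exact Or.inr ((pvAllm1_iff r c).mp ⟨hm1, hall⟩)
  · rintro (⟨han, hch⟩ | ⟨han, hch⟩)
    · have := (pvAll1_iff r c).mpr ⟨han, hch⟩
      exact ⟨pvPureU r c han hch, Or.inl this.1⟩
    · have := (pvAllm1_iff r c).mpr ⟨han, hch⟩
      exact ⟨pvPureD r c han hch, Or.inr this.1⟩
theorem pvContD_nonneg (l : List Char) : ∀ p, 0 ≤ pvContD p l := by
  induction l with
  | nil => intro p; simp [pvContD]
  | cons c r ih =>
    intro p
    simp only [pvContD]
    split
    · have := ih (some (pvOrd c)); omega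
    · omega
theorem pvContD_none (l : List Char) : pvContD none l = 0 := by
  cases l with
  | nil => rfl
  | cons c r => simp [pvContD]
theorem pvContD_le (l : List Char) : ∀ p, pvContD p l ≤ l.length := by
  induction l with
  | nil => intro p; simp [pvContD]
  | cons c r ih =>
    intro p
    simp only [pvContD, List.length_cons]
    split
    · have := ih (some (pvOrd c)); push_cast; omega
    · positivity
theorem pvHD_le (l : List Char) : pvHD l ≤ l.length := by
  cases l with
  | nil => simp [pvHD]
  | cons c r =>
    simp only [pvHD, List.length_cons]
    split
    · have := pvContD_le r (some (pvOrd c)); push_cast; omega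
    · positivity
theorem pvContD_take (r : List Char) : ∀ (o : Int) (k : Nat), k ≤ r.length →
    ((k : Int) ≤ pvContD (some o) r ↔ pvChainFD o (r.take k) = true) := by
  induction r with
  | nil =>
    intro o k hk
    simp at hk
    subst hk
    simp [pvContD, pvChainFD]
  | cons c r ih =>
    intro o k hk
    cases k with
    | zero =>
      have := pvContD_nonneg (c :: r) (some o)
      simp [pvChainFD]
      omega
    | succ k =>
      simp only [List.take_succ_cons, pvChainFD, pvContD, Bool.and_eq_true, beq_iff_eq]
      split
      · rename_i hcond
        obtain ⟨han, hprev⟩ := hcond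
        have hoc : pvOrd c = o - 1 := by
          injection hprev with h'; omega
        have hrec := ih (pvOrd c) k (by simpa using hk)
        push_cast
        constructor
        · intro hle
          exact ⟨⟨han, hoc⟩, hrec.mp (by omega)⟩
        · rintro ⟨-, hch⟩
          have := hrec.mpr hch
          omega
      · rename_i hcond
        constructor
        · intro hle; push_cast at hle; omega
        · rintro ⟨⟨han, hoc⟩, -⟩
          have hsome : some o = some (pvOrd c + 1) := by rw [hoc]; congr 1; ring
          exact absurd ⟨han, hsome⟩ hcond
theorem pvHD_take (t : List Char) (k : Nat) (hk : 1 ≤ k) (hkl : k ≤ t.length) :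
    ((k : Int) ≤ pvHD t ↔ pvChainD (t.take k) = true) := by
  cases t with
  | nil => simp at hkl; omega
  | cons c r =>
    cases k with
    | zero => omega
    | succ k =>
      simp only [List.take_succ_cons, pvChainD, pvHD, Bool.and_eq_true]
      by_cases han : pvAn c = true
      · rw [if_pos han]
        rw [← pvContD_take r (pvOrd c) k (by simpa using hkl)]
        push_cast
        constructor
        · intro h; exact ⟨han, by omega⟩
        · rintro ⟨-, h⟩; omega
      · rw [if_neg han]
        constructor
        · intro h; push_cast at h; omega
        · rintro ⟨h, -⟩; exact absurd h han
def pvInner (m : Int) (l : List Char) : Prop := ∃ j : Nat, m ≤ pvHU (l.drop j) ∨ m ≤ pvHD (l.drop j)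
theorem pvInner_cons (m : Int) (c : Char) (r : List Char) :
    pvInner m (c :: r) ↔ ((m ≤ pvHU (c :: r) ∨ m ≤ pvHD (c :: r)) ∨ pvInner m r) := by
  constructor
  · rintro ⟨j, hj⟩
    cases j with
    | zero => exact Or.inl (by simpa using hj)
    | succ j => exact Or.inr ⟨j, by simpa using hj⟩
  · rintro (h | ⟨j, hj⟩)
    · exact ⟨0, by simpa using h⟩
    · exact ⟨j + 1, by simpa using hj⟩
theorem pvLoopB_iff (m : Int) (hm : 1 ≤ m) : ∀ (l : List Char) (prev : Option Int) (u d : Int),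
    0 ≤ u → u < m → 0 ≤ d → d < m →
    (pvLoopB m prev u d l = true ↔
      (m ≤ u + pvContU prev l ∨ m ≤ d + pvContD prev l ∨ pvInner m l)) := by
  intro l
  induction l with
  | nil =>
    intro prev u d hu hum hd hdm
    simp only [pvLoopB, pvContU, pvContD, pvInner, List.drop_nil, pvHU, pvHD, Bool.false_eq_true,
      false_iff]
    rintro (h | h | ⟨j, hj | hj⟩) <;> omega
  | cons c rest ih =>
    intro prev u d hu hum hd hdm
    have hXnn := pvContU_nonneg rest (some (pvOrd c))
    have hYnn := pvContD_nonneg rest (some (pvOrd c))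
    rw [pvInner_cons]
    by_cases han : pvAn c = true
    · have han' : (PySem.Chars.isdigit c || PySem.Chars.isalpha c) = true := han
      simp only [pvLoopB, han', if_true]
      simp only [pvContU, pvContD, pvHU, pvHD, han, true_and, if_pos]
      have hneq : (some (pvOrd c - 1) : Option Int) ≠ some (pvOrd c + 1) := by
        intro h; injection h with h; omega
      have hneq' : (some (pvOrd c + 1) : Option Int) ≠ some (pvOrd c - 1) := by
        intro h; injection h with h; omega
      by_cases hpu : prev = some (pvOrd c - 1) <;> by_cases hpd : prev = some (pvOrd c + 1)
      · exfalso
        rw [hpu] at hpd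
        injection hpd with h'
        omega
      · simp only [hpu, reduceIte]
        simp only [if_neg hneq]
        by_cases hstop : m ≤ u + 1 ∨ m ≤ (1 : Int)
        · rw [if_pos hstop]
          simp only [true_iff]
          rcases hstop with h | h
          · left; omega
          · right; right; left; left; omega
        · rw [if_neg hstop]
          rw [ih (some (pvOrd c)) (u + 1) 1 (by omega) (by omega) (by omega) (by omega)]
          constructor
          · rintro (h | h | h)
            · left; omega
            · right; right; left; right; omega
            · right; right; right; exact h
          · rintro (h | h | (h | h) | h)
            · left; omega
            · omega
            · left; omega
            · right; left; omega
            · right; right; exact h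
      · simp only [hpd, reduceIte]
        simp only [if_neg hneq']
        by_cases hstop : m ≤ (1 : Int) ∨ m ≤ d + 1
        · rw [if_pos hstop]
          simp only [true_iff]
          rcases hstop with h | h
          · right; right; left; left; omega
          · right; left; omega
        · rw [if_neg hstop]
          rw [ih (some (pvOrd c)) 1 (d + 1) (by omega) (by omega) (by omega) (by omega)]
          constructor
          · rintro (h | h | h)
            · right; right; left; left; omega
            · right; left; omega
            · right; right; right; exact h
          · rintro (h | h | (h | h) | h)
            · omega
            · right; omega
            · left; omega
            · right; left; omega
            · right; right; exact h
      · simp only [hpu, hpd, reduceIte]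
        by_cases hstop : m ≤ (1 : Int) ∨ m ≤ (1 : Int)
        · rw [if_pos hstop]
          simp only [true_iff]
          right; right; left; left
          omega
        · rw [if_neg hstop]
          rw [ih (some (pvOrd c)) 1 1 (by omega) (by omega) (by omega) (by omega)]
          constructor
          · rintro (h | h | h)
            · right; right; left; left; omega
            · right; right; left; right; omega
            · right; right; right; exact h
          · rintro (h | h | (h | h) | h)
            · omega
            · omega
            · left; omega
            · right; left; omega
            · right; right; exact h
    · have han' : (PySem.Chars.isdigit c || PySem.Chars.isalpha c) = false := by
        simpa [pvAn] using han
      simp only [pvLoopB, han', Bool.false_eq_true, if_false]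
      rw [ih none 0 0 (by omega) (by omega) (by omega) (by omega)]
      simp only [pvContU_none, pvContD_none, add_zero]
      have hCU : pvContU prev (c :: rest) = 0 := by
        simp only [pvContU]
        rw [if_neg]
        rintro ⟨h, -⟩
        exact han h
      have hCD : pvContD prev (c :: rest) = 0 := by
        simp only [pvContD]
        rw [if_neg]
        rintro ⟨h, -⟩
        exact han h
      have hHU : pvHU (c :: rest) = 0 := by
        simp only [pvHU]
        rw [if_neg han]
      have hHD : pvHD (c :: rest) = 0 := by
        simp only [pvHD]
        rw [if_neg han]
      rw [hCU, hCD, hHU, hHD]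
      constructor
      · rintro (h | h | h)
        · omega
        · omega
        · right; right; right; exact h
      · rintro (h | h | (h | h) | h)
        · omega
        · omega
        · omega
        · omega
        · right; right; exact h
theorem pvWindowA_iff (lower : String) (m i : Int) (hm : 1 ≤ m) (hi : 0 ≤ i)
    (hle : i + m ≤ (lower.toList.length : Int)) :
    (pvWindowA lower m i = true ↔
      (m ≤ pvHU (lower.toList.drop i.toNat) ∨ m ≤ pvHD (lower.toList.drop i.toNat))) := by
  have him : 0 ≤ i + m := by omega
  have hwl : (PySem.Str.slice lower (some i) (some (i + m))).toList
      = (lower.toList.drop i.toNat).take m.toNat := by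
    rw [PySem.Str.toList_slice, PySem.Chars.slice_eq_listSlice, PySem.List.slice_toNat _ hi him]
    congr 1
    omega
  have htl : m.toNat ≤ (lower.toList.drop i.toNat).length := by
    simp only [List.length_drop]
    omega
  have hlen : ((lower.toList.drop i.toNat).take m.toNat).length = m.toNat := by
    simp only [List.length_take]
    omega
  obtain ⟨c, r, hcr⟩ : ∃ c r, (lower.toList.drop i.toNat).take m.toNat = c :: r := by
    cases h : (lower.toList.drop i.toNat).take m.toNat with
    | nil => rw [h] at hlen; simp at hlen; omega
    | cons c r => exact ⟨c, r, rfl⟩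
  have hite : ∀ (g s : Bool), (if (!g) = true then false else s) = (g && s) := by decide
  unfold pvWindowA
  simp only [PySem.Str.strIsdigit_eq, PySem.Str.strIsalpha_eq, hwl, pvStepsA_eq, hite, hcr]
  rw [pvWindowCheck_iff c r, ← hcr,
    ← pvHU_take (lower.toList.drop i.toNat) m.toNat (by omega) htl,
    ← pvHD_take (lower.toList.drop i.toNat) m.toNat (by omega) htl]
  have : ((m.toNat : Nat) : Int) = m := by omega
  rw [this]

theorem pvLowerLen (value : String) : (PySem.Str.lower value).toList.length = value.length := by
  rw [PySem.Str.toList_lower]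
  simp [PySem.Chars.lower]

theorem pvA_iff (value : String) (m : Int) (hm : 1 ≤ m) :
    (has_consecutive_sequence_py value m = true ↔ pvInner m (PySem.Str.lower value).toList) := by
  unfold has_consecutive_sequence_py
  have hLL : (PySem.Str.lower value).toList.length = value.length := pvLowerLen value
  by_cases hsmall : (value.length : Int) < m
  · rw [if_pos hsmall]
    simp only [Bool.false_eq_true, false_iff]
    rintro ⟨j, hj⟩
    have h1 := pvHU_le ((PySem.Str.lower value).toList.drop j)
    have h2 := pvHD_le ((PySem.Str.lower value).toList.drop j)
    simp only [List.length_drop, hLL] at h1 h2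
    rcases hj with hj | hj <;> omega
  · rw [if_neg hsmall]
    have hlen' : ((PySem.Str.lower value).length : Int) = (value.length : Int) := by
      rw [← String.length_toList, hLL]
    simp only [List.any_eq_true]
    constructor
    · rintro ⟨x, hx, hwin⟩
      rw [PySem.List.mem_pyRange_one] at hx
      obtain ⟨hx0, hxlt⟩ := hx
      rw [hlen'] at hxlt
      have hxle : x + m ≤ ((PySem.Str.lower value).toList.length : Int) := by
        rw [hLL]; omega
      rw [pvWindowA_iff (PySem.Str.lower value) m x hm hx0 hxle] at hwin
      exact ⟨x.toNat, hwin⟩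
    · rintro ⟨j, hj⟩
      have h1 := pvHU_le ((PySem.Str.lower value).toList.drop j)
      have h2 := pvHD_le ((PySem.Str.lower value).toList.drop j)
      simp only [List.length_drop, hLL] at h1 h2
      have hjm : (j : Int) + m ≤ (value.length : Int) := by
        rcases hj with hj | hj <;> omega
      refine ⟨(j : Int), ?_, ?_⟩
      · rw [PySem.List.mem_pyRange_one, hlen']
        omega
      · rw [pvWindowA_iff (PySem.Str.lower value) m (j : Int) hm (by positivity) (by rw [hLL]; omega)]
        simpa using hj

theorem pvB_iff (value : String) (m : Int) (hm : 1 ≤ m) :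
    (has_consecutive_sequence_py_alt value m = true ↔ pvInner m (PySem.Str.lower value).toList) := by
  unfold has_consecutive_sequence_py_alt
  rw [if_neg (by omega)]
  rw [pvLoopB_iff m hm _ none 0 0 (by omega) (by omega) (by omega) (by omega)]
  rw [pvContU_none, pvContD_none]
  constructor
  · rintro (h | h | h)
    · omega
    · omega
    · exact h
  · intro h
    right; right; exact h

theorem pvA_zero (value : String) : has_consecutive_sequence_py value 0 = false := by
  unfold has_consecutive_sequence_py
  rw [if_neg (by omega)]
  rw [List.any_eq_false]
  intro i hi
  unfold pvWindowA
  have hnil : (PySem.Str.slice (PySem.Str.lower value) (some i) (some (i + 0))).toList = [] := by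
    rw [PySem.Str.toList_slice, PySem.Chars.slice_eq_listSlice]
    have h0 : i + 0 = i := by ring
    rw [h0]
    apply List.length_eq_zero_iff.mp
    rw [PySem.List.length_slice]
    omega
  simp only [PySem.Str.strIsdigit_eq, PySem.Str.strIsalpha_eq, hnil]
  simp [PySem.Chars.strIsdigit, PySem.Chars.strIsalpha]

-- ===== VERDICT (by name: the statement is the Claim_ definition above) =====
theorem has_consecutive_sequence_py_spec : Claim_equal_has_consecutive_sequence_py := by
  intro value m _ hpre
  unfold Spec_has_consecutive_sequence_py
  by_cases hm : 1 ≤ m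
  · rw [Bool.eq_iff_iff, pvA_iff value m hm, pvB_iff value m hm]
  · have hm0 : m = 0 := by unfold Pre_has_consecutive_sequence_py at hpre; omega
    subst hm0
    rw [pvA_zero]
    unfold has_consecutive_sequence_py_alt
    simp
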